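-- pv_equiv track=rewrite | github.com/minhluan96/leetcode-practice | leetcode/src/bigocoding/stack_and_queue/throwing_cards_away_I.py | throwinngCardsAwayI
-- ===== SOURCE A (Python) =====
-- import queue
--
-- def throwinngCardsAwayI(n):
--     cards = queue.Queue()
--     discards = []
--
--     for i in range(n):
--         cards.put(i + 1)
--
--     while cards.qsize() > 1:
--         top = cards.get()
--         second = cards.get()
--         discards.append(top)
--         cards.put(second)
--
--     return [list(cards.queue), discards]
-- ===== SOURCE B (Python) =====
-- def throwinngCardsAwayI(n):
--     cards = list(range(1, n + 1))
--     discards = []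
--     while len(cards) > 1:
--         discards.extend(cards[0::2])
--         kept = cards[1::2]
--         if len(cards) % 2 == 1:
--             kept = kept[1:] + kept[:1]
--         cards = kept
--     return [cards, discards]
-- ===== Notes on version B (the rewrite author's own statement) =====
-- stated objective: faster
-- what changed: Replaces A's one-card-per-round FIFO-queue simulation with whole-sweep halving: each pass discards all even-position cards at once via slicing and rotates the kept list by one on odd length, so the n queue rounds become O(log n) list passes.
import Mathlib
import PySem

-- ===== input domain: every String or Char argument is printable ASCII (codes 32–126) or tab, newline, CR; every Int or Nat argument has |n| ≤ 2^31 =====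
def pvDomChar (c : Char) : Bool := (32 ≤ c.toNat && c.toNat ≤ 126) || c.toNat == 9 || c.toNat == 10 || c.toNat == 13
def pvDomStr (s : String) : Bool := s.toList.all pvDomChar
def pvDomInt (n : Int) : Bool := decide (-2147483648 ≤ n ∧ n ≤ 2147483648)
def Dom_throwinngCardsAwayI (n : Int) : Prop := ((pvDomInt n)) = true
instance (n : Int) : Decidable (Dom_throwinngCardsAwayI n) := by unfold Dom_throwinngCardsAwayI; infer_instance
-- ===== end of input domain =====

-- B replaces A's one-card-at-a-time FIFO-queue simulation by whole-sweep halving: each pass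
-- discards the cards at even positions at once and, on odd length, rotates the kept list by
-- one; objective: faster (O(log n) passes of slicing instead of n queue rounds).

-- ===== PORT A =====
-- A's while-loop: top = get, second = get, discard top, put second back.
def throwinngCardsAwayI_loopA : List Int → List Int → List (List Int)
  | a :: b :: rest, ds => throwinngCardsAwayI_loopA (rest ++ [b]) (ds ++ [a])
  | q, ds => [q, ds]
termination_by q _ => q.length
decreasing_by simp

def throwinngCardsAwayI (n : Int) : List (List Int) :=
  -- for i in range(n): cards.put(i + 1)
  let cards := (PySem.List.pyRange 0 n 1).foldl (fun q i => q ++ [i + 1]) []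
  throwinngCardsAwayI_loopA cards []

-- ===== PORT B =====
-- hand ports of the extended slices cards[0::2] / cards[1::2] (exact: elements at even /
-- odd positions, in order)
mutual
def pvEvens : List Int → List Int
  | [] => []
  | a :: t => a :: pvOdds t
def pvOdds : List Int → List Int
  | [] => []
  | _ :: t => pvEvens t
end

-- cited by loopB's decreasing_by
lemma pvOdds_length : ∀ l : List Int, (pvEvens l).length = (l.length + 1) / 2 ∧ (pvOdds l).length = l.length / 2 := by
  intro l
  induction l with
  | nil => simp [pvEvens, pvOdds]
  | cons a t ih => refine ⟨?_, ?_⟩ <;> simp [pvEvens, pvOdds, ih.1, ih.2] <;> omega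

-- B's while-loop: discards += cards[0::2]; kept = cards[1::2]; rotate kept on odd length.
def throwinngCardsAwayI_loopB (cards ds : List Int) : List (List Int) :=
  if 1 < cards.length then
    let kept := pvOdds cards
    let kept' := if cards.length % 2 = 1 then kept.drop 1 ++ kept.take 1 else kept
    throwinngCardsAwayI_loopB kept' (ds ++ pvEvens cards)
  else [cards, ds]
termination_by cards.length
decreasing_by
  have := (pvOdds_length cards).2
  split <;> simp_all <;> omega

def throwinngCardsAwayI_alt (n : Int) : List (List Int) :=
  let cards := PySem.List.pyRange 1 (n + 1) 1   -- list(range(1, n+1))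
  throwinngCardsAwayI_loopB cards []

-- ===== PRECONDITION & SPEC =====
def Spec_throwinngCardsAwayI (n : Int) (out : List (List Int)) : Prop := out = throwinngCardsAwayI_alt n
instance (n : Int) (out : List (List Int)) : Decidable (Spec_throwinngCardsAwayI n out) := by unfold Spec_throwinngCardsAwayI; infer_instance

-- ===== CLAIM (what is proved, stated in full; the proofs are below) =====
def Claim_equal_throwinngCardsAwayI : Prop := ∀ (n : Int), Dom_throwinngCardsAwayI n → Spec_throwinngCardsAwayI n (throwinngCardsAwayI n)

-- ===== LEMMAS AND PROOFS =====

-- appending one element to an even-length list: it lands on an even position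
lemma pv_snoc : ∀ (m : Nat) (u : List Int) (z : Int), u.length = m → u.length % 2 = 0 →
    pvEvens (u ++ [z]) = pvEvens u ++ [z] ∧ pvOdds (u ++ [z]) = pvOdds u := by
  intro m
  induction m using Nat.strong_induction_on with
  | _ m ih =>
    intro u z hm hpar
    rcases u with _ | ⟨a, _ | ⟨b, u'⟩⟩
    · simp [pvEvens, pvOdds]
    · simp at hpar
    · have := ih (u'.length) (by simp at hm; omega) u' z rfl (by simp at hpar ⊢; omega)
      simp [pvEvens, pvOdds, this.1, this.2]

-- unrolling loopA over one full pass of an even-length prefix u (k = cards already kept)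
lemma pv_pass : ∀ (m : Nat) (u : List Int), u.length = m → u.length % 2 = 0 →
    ∀ (k ds : List Int),
    throwinngCardsAwayI_loopA (u ++ k) ds
      = throwinngCardsAwayI_loopA (k ++ pvOdds u) (ds ++ pvEvens u) := by
  intro m
  induction m using Nat.strong_induction_on with
  | _ m ih =>
    intro u hm hpar k ds
    rcases u with _ | ⟨a, _ | ⟨b, u'⟩⟩
    · simp [pvEvens, pvOdds]
    · simp at hpar
    · rw [List.cons_append, List.cons_append, throwinngCardsAwayI_loopA, List.append_assoc]
      rw [ih (u'.length) (by simp at hm; omega) u' rfl (by simp at hpar ⊢; omega) (k ++ [b]) (ds ++ [a])]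
      simp [pvEvens, pvOdds, List.append_assoc]

-- main invariant: loopA = loopB on every queue
lemma pv_key : ∀ (m : Nat) (cards : List Int), cards.length = m → ∀ (ds : List Int),
    throwinngCardsAwayI_loopA cards ds = throwinngCardsAwayI_loopB cards ds := by
  intro m
  induction m using Nat.strong_induction_on with
  | _ m ih =>
    intro cards hm ds
    by_cases h2 : 1 < cards.length
    · rw [throwinngCardsAwayI_loopB]
      simp only [h2, if_pos]
      by_cases hpar : cards.length % 2 = 1
      · -- odd length ≥ 3: split off the last card
        have hne : cards ≠ [] := by intro h; rw [h] at h2; simp at h2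
        have hsplit : cards.dropLast ++ [cards.getLast hne] = cards := List.dropLast_append_getLast hne
        have hul : cards.dropLast.length = cards.length - 1 := by simp
        have hupar : cards.dropLast.length % 2 = 0 := by omega
        have hsn := pv_snoc cards.dropLast.length cards.dropLast (cards.getLast hne) rfl hupar
        have hol : (pvOdds cards.dropLast).length = (cards.length - 1) / 2 := by
          rw [(pvOdds_length cards.dropLast).2, hul]
        obtain ⟨o, os, ho⟩ : ∃ o os, pvOdds cards.dropLast = o :: os := by
          rcases hzz : pvOdds cards.dropLast with _ | ⟨o, os⟩
          · rw [hzz] at hol; simp at hol; omega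
          · exact ⟨o, os, rfl⟩
        rw [← hsplit, pv_pass cards.dropLast.length cards.dropLast rfl hupar [cards.getLast hne] ds]
        rw [ho, List.singleton_append, throwinngCardsAwayI_loopA]
        have hkept : pvOdds (cards.dropLast ++ [cards.getLast hne]) = o :: os := by
          rw [hsn.2, ho]
        have hev : pvEvens (cards.dropLast ++ [cards.getLast hne])
            = pvEvens cards.dropLast ++ [cards.getLast hne] := hsn.1
        rw [if_pos (by rw [hsplit]; exact hpar), hkept, hev]
        simp only [List.drop_succ_cons, List.drop_zero, List.take_succ_cons, List.take_zero]
        rw [← ih (os.length + 1) (by rw [hsplit] at *; have := hol; simp_all; omega)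
              (os ++ [o]) (by simp) (ds ++ (pvEvens cards.dropLast ++ [cards.getLast hne]))]
        simp [List.append_assoc]
      · -- even length: one pass, no rotation
        have := pv_pass cards.length cards rfl (by omega) [] ds
        rw [List.append_nil] at this
        rw [this, List.nil_append, if_neg hpar]
        exact ih (cards.length / 2) (by omega) (pvOdds cards) (pvOdds_length cards).2 _
    · rw [throwinngCardsAwayI_loopB, if_neg h2]
      rcases cards with _ | ⟨c, _ | ⟨d, t⟩⟩
      · rw [throwinngCardsAwayI_loopA]
        exact fun a b rest h => by simp at h
      · rw [throwinngCardsAwayI_loopA]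
        exact fun a b rest h => by simp at h
      · simp at h2

lemma pv_foldl_put (l : List Int) (init : List Int) :
    l.foldl (fun q i => q ++ [i + 1]) init = init ++ l.map (· + 1) := by
  induction l generalizing init with
  | nil => simp
  | cons x xs ih => simp [List.foldl, ih]

lemma pv_cards_eq (n : Int) :
    (PySem.List.pyRange 0 n 1).foldl (fun q i => q ++ [i + 1]) [] = PySem.List.pyRange 1 (n + 1) 1 := by
  rw [pv_foldl_put, List.nil_append, PySem.List.pyRange_one, PySem.List.pyRange_one]
  have : (n + 1 - 1 : Int) = n - 0 := by ring
  rw [this]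
  simp [List.map_map, Function.comp]
  intro a _
  ring

-- ===== VERDICT (by name: the statement is the Claim_ definition above) =====
theorem throwinngCardsAwayI_spec : Claim_equal_throwinngCardsAwayI := by
  intro n _
  unfold Spec_throwinngCardsAwayI throwinngCardsAwayI throwinngCardsAwayI_alt
  simp only [pv_cards_eq]
  exact pv_key _ _ rfl []
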